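-- pv_equiv track=rewrite | github.com/osnatairy/minimal_separators_project | analysis/adjustment_hasse.py | build_hasse_and_edges
-- ===== SOURCE A (Python) =====
-- from typing import Iterable, Hashable, Set, Dict, Tuple, List, FrozenSet
-- from typing import Iterable, List, Tuple, Dict, Optional
--
-- def _normalize_family(family: Iterable[Iterable]) -> List[frozenset]:
--     uniq = set()
--     norm = []
--     for s in family:
--         fs = frozenset(s)
--         if fs not in uniq:
--             uniq.add(fs)
--             norm.append(fs)
--     return norm
--
-- def build_hasse_and_edges(family: Iterable[Iterable]):
--     nodes = _normalize_family(family)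
--     nodes_sorted = sorted(nodes, key=lambda s: (len(s), sorted(map(str, s))))
--     n = len(nodes_sorted)
--     subset_edges = []
--     for i in range(n):
--         A = nodes_sorted[i]
--         for j in range(i+1, n):
--             B = nodes_sorted[j]
--             if len(A) >= len(B):
--                 continue
--             if A.issubset(B):
--                 subset_edges.append((A,B))
--     hasse_edges = []
--     by_size = {}
--     for s in nodes_sorted:
--         by_size.setdefault(len(s), []).append(s)
--     for A,B in subset_edges:
--         is_cover = True
--         for k in range(len(A)+1, len(B)):
--             for C in by_size.get(k, []):
--                 if A.issubset(C) and C.issubset(B):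
--                     is_cover = False
--                     break
--             if not is_cover:
--                 break
--         if is_cover:
--             hasse_edges.append((A,B))
--     return nodes_sorted, hasse_edges
-- ===== SOURCE B (Python) =====
-- def build_hasse_and_edges(family):
--     # Transitive reduction over a precomputed strict-subset relation on indices:
--     # succ[i] is the index set of proper supersets of nodes[i]; (i, j) is a Hasse
--     # (cover) edge iff j is in succ[i] and no k in succ[i] has j in succ[k].
--     # No element-level subset test or by-size level scan happens per edge.
--     nodes = list(dict.fromkeys(map(frozenset, family)))
--     nodes.sort(key=lambda s: (len(s), sorted(map(str, s))))
--     n = len(nodes)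
--     succ = [{j for j in range(n) if nodes[i] < nodes[j]} for i in range(n)]
--     hasse = [(nodes[i], nodes[j])
--              for i in range(n)
--              for j in sorted(succ[i])
--              if not any(j in succ[k] for k in succ[i])]
--     return nodes, hasse
-- ===== Notes on version B (the rewrite author's own statement) =====
-- stated objective: alternative
-- what changed: B precomputes the strict-subset relation once as per-node successor index sets and does the transitive reduction by relation lookups (edge (i,j) is kept iff no k in succ[i] has j in succ[k]), replacing A's explicit subset-edge list, by-size bucket dict and per-edge level rescans with element-level subset tests.
import Mathlib
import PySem

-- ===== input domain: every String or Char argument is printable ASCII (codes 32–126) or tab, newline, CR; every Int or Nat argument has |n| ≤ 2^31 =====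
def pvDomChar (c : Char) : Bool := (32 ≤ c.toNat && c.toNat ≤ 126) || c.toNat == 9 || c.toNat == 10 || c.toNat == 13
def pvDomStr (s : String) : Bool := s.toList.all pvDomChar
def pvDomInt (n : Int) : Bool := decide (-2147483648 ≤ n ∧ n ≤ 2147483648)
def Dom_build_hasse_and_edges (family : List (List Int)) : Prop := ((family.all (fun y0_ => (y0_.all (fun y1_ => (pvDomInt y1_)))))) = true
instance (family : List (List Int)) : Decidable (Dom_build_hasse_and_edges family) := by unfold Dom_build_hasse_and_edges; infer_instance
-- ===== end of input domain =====

-- B replaces A's per-edge level scan over a by-size dict with a precomputed strict-subset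
-- relation on indices (successor sets) and a relation-lookup transitive reduction: alternative.

-- shared sort key: both Pythons contain the same call sorted(..., key=lambda s: (len(s), sorted(map(str, s))))
-- (sorting the mapped strings is order-independent since str is injective, so iterating the frozenset is exact here)
def pvKeyStrs (s : PySem.Set Int) : List String :=
  PySem.List.sorted (s.map PySem.Int.toStr) (fun x => x)

-- frozenset proper inclusion: Python's  A < B
def pyLtSet (s t : PySem.Set Int) : Bool := PySem.Set.issubset s t && !(PySem.Set.equal s t)

-- ===== PORT A =====
-- Python's 'uniq' is a set of frozensets (membership decided by set equality): modelled as the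
-- list of its elements tested with Set.equal — exact for the membership test performed here.
def pyNormalizeFamily (family : List (List Int)) : List (PySem.Set Int) :=
  (family.foldl (fun (st : List (PySem.Set Int) × List (PySem.Set Int)) s =>
      let fs : PySem.Set Int := PySem.Set.ofList s
      if st.1.any (fun g => PySem.Set.equal fs g) then st
      else (st.1 ++ [fs], st.2 ++ [fs])) ([], [])).2

def build_hasse_and_edges (family : List (List Int)) : List (List Int) × (List (List Int × List Int)) :=
  let nodes := pyNormalizeFamily family
  let nodes_sorted := PySem.List.sorted2 nodes PySem.Set.len pvKeyStrs
  let n : Int := PySem.List.len nodes_sorted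
  let subset_edges : List (List Int × List Int) :=
    (PySem.List.pyRange 0 n).foldl (fun acc i =>
      let A := PySem.List.pyGetD nodes_sorted i []
      (PySem.List.pyRange (i + 1) n).foldl (fun acc j =>
        let B := PySem.List.pyGetD nodes_sorted j []
        if PySem.Set.len A ≥ PySem.Set.len B then acc
        else if PySem.Set.issubset A B then acc ++ [(A, B)] else acc) acc) []
  let by_size : PySem.Dict Int (List (PySem.Set Int)) :=
    nodes_sorted.foldl (fun d s => d.modify (PySem.Set.len s) [] (fun l => l ++ [s])) PySem.Dict.empty
  let hasse_edges : List (List Int × List Int) :=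
    subset_edges.foldl (fun acc AB =>
      let is_cover :=
        (PySem.List.pyRange (PySem.Set.len AB.1 + 1) (PySem.Set.len AB.2)).foldl (fun ok k =>
          (by_size.getD k []).foldl (fun ok C =>
            if PySem.Set.issubset AB.1 C && PySem.Set.issubset C AB.2 then false else ok) ok) true
      if is_cover then acc ++ [AB] else acc) []
  (nodes_sorted, hasse_edges)

-- ===== PORT B =====
-- dict.fromkeys with frozenset keys: modelled as the ordered first-occurrence fold with
-- set-equality membership — exact for the dedup performed here; the set comprehension for
-- succ[i] is Set.ofList of the (already distinct) filtered index range; 'any(... for k in succ[i])'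
-- consumes the set order-independently, so iterating the model's list is exact.
def build_hasse_and_edges_alt (family : List (List Int)) : List (List Int) × (List (List Int × List Int)) :=
  let nodes0 := family.foldl (fun (acc : List (PySem.Set Int)) s =>
      let fs : PySem.Set Int := PySem.Set.ofList s
      if acc.any (fun g => PySem.Set.equal fs g) then acc else acc ++ [fs]) []
  let nodes := PySem.List.sorted2 nodes0 PySem.Set.len pvKeyStrs
  let n : Int := PySem.List.len nodes
  let succ : List (PySem.Set Int) :=
    (PySem.List.pyRange 0 n).map (fun i =>
      PySem.Set.ofList ((PySem.List.pyRange 0 n).filter (fun j =>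
        pyLtSet (PySem.List.pyGetD nodes i []) (PySem.List.pyGetD nodes j []))))
  let hasse : List (List Int × List Int) :=
    (PySem.List.pyRange 0 n).foldl (fun acc i =>
      (PySem.List.sorted (PySem.List.pyGetD succ i []) (fun x => x)).foldl (fun acc j =>
        if !((PySem.List.pyGetD succ i []).any (fun k =>
              PySem.Set.contains (PySem.List.pyGetD succ k []) j))
        then acc ++ [(PySem.List.pyGetD nodes i [], PySem.List.pyGetD nodes j [])] else acc) acc) []
  (nodes, hasse)

-- ===== PRECONDITION & SPEC =====
def Spec_build_hasse_and_edges (family : List (List Int)) (out : List (List Int) × (List (List Int × List Int))) : Prop := out = build_hasse_and_edges_alt family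
instance (family : List (List Int)) (out : List (List Int) × (List (List Int × List Int))) : Decidable (Spec_build_hasse_and_edges family out) := by unfold Spec_build_hasse_and_edges; infer_instance

-- ===== CLAIM (what is proved, stated in full; the proofs are below) =====
def Claim_equal_build_hasse_and_edges : Prop := ∀ (family : List (List Int)), Dom_build_hasse_and_edges family → Spec_build_hasse_and_edges family (build_hasse_and_edges family)

-- ===== LEMMAS AND PROOFS =====

-- B's dedup loop (proof-side name for the fold in build_hasse_and_edges_alt)
def pvNormB (family : List (List Int)) : List (PySem.Set Int) :=
  family.foldl (fun (acc : List (PySem.Set Int)) s =>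
      let fs : PySem.Set Int := PySem.Set.ofList s
      if acc.any (fun g => PySem.Set.equal fs g) then acc else acc ++ [fs]) []

-- A's strict-subset test by sizes
def pvC1 (A B : PySem.Set Int) : Bool :=
  decide (PySem.Set.len A < PySem.Set.len B) && PySem.Set.issubset A B

-- A's is_cover test as a predicate on an edge (proof-side name for the literal double loop)
def pvP (N : List (PySem.Set Int)) (AB : List Int × List Int) : Bool :=
  (PySem.List.pyRange (PySem.Set.len AB.1 + 1) (PySem.Set.len AB.2)).foldl (fun ok k =>
    ((N.foldl (fun d s => d.modify (PySem.Set.len s) [] (fun l => l ++ [s]))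
        (PySem.Dict.empty : PySem.Dict Int (List (PySem.Set Int)))).getD k []).foldl (fun ok C =>
      if PySem.Set.issubset AB.1 C && PySem.Set.issubset C AB.2 then false else ok) ok) true

-- proof-side names for the two edge-building bodies, as functions of the sorted node list
def pvHasseA (N : List (PySem.Set Int)) : List (List Int × List Int) :=
  let n : Int := PySem.List.len N
  let subset_edges : List (List Int × List Int) :=
    (PySem.List.pyRange 0 n).foldl (fun acc i =>
      let A := PySem.List.pyGetD N i []
      (PySem.List.pyRange (i + 1) n).foldl (fun acc j =>
        let B := PySem.List.pyGetD N j []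
        if PySem.Set.len A ≥ PySem.Set.len B then acc
        else if PySem.Set.issubset A B then acc ++ [(A, B)] else acc) acc) []
  let by_size : PySem.Dict Int (List (PySem.Set Int)) :=
    N.foldl (fun d s => d.modify (PySem.Set.len s) [] (fun l => l ++ [s])) PySem.Dict.empty
  subset_edges.foldl (fun acc AB =>
    let is_cover :=
      (PySem.List.pyRange (PySem.Set.len AB.1 + 1) (PySem.Set.len AB.2)).foldl (fun ok k =>
        (by_size.getD k []).foldl (fun ok C =>
          if PySem.Set.issubset AB.1 C && PySem.Set.issubset C AB.2 then false else ok) ok) true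
    if is_cover then acc ++ [AB] else acc) []

-- B's successor index set of i, before the set constructor
def pvS (N : List (PySem.Set Int)) (i : Int) : List Int :=
  (PySem.List.pyRange 0 (PySem.List.len N)).filter (fun j =>
    pyLtSet (PySem.List.pyGetD N i []) (PySem.List.pyGetD N j []))

def pvSucc (N : List (PySem.Set Int)) : List (PySem.Set Int) :=
  (PySem.List.pyRange 0 (PySem.List.len N)).map (fun i => PySem.Set.ofList (pvS N i))

def pvHasseB (N : List (PySem.Set Int)) : List (List Int × List Int) :=
  (PySem.List.pyRange 0 (PySem.List.len N)).foldl (fun acc i =>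
    (PySem.List.sorted (PySem.List.pyGetD (pvSucc N) i []) (fun x => x)).foldl (fun acc j =>
      if !((PySem.List.pyGetD (pvSucc N) i []).any (fun k =>
            PySem.Set.contains (PySem.List.pyGetD (pvSucc N) k []) j))
      then acc ++ [(PySem.List.pyGetD N i [], PySem.List.pyGetD N j [])] else acc) acc) []

lemma A_unfold (family : List (List Int)) :
    build_hasse_and_edges family =
      (PySem.List.sorted2 (pyNormalizeFamily family) PySem.Set.len pvKeyStrs,
       pvHasseA (PySem.List.sorted2 (pyNormalizeFamily family) PySem.Set.len pvKeyStrs)) := rfl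

lemma B_unfold (family : List (List Int)) :
    build_hasse_and_edges_alt family =
      (PySem.List.sorted2 (pvNormB family) PySem.Set.len pvKeyStrs,
       pvHasseB (PySem.List.sorted2 (pvNormB family) PySem.Set.len pvKeyStrs)) := rfl

lemma norm_aux (fam : List (List Int)) (acc : List (PySem.Set Int)) :
    (fam.foldl (fun (st : List (PySem.Set Int) × List (PySem.Set Int)) s =>
        let fs : PySem.Set Int := PySem.Set.ofList s
        if st.1.any (fun g => PySem.Set.equal fs g) then st
        else (st.1 ++ [fs], st.2 ++ [fs])) (acc, acc)).2
    = fam.foldl (fun (acc : List (PySem.Set Int)) s =>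
        if acc.any (fun g => PySem.Set.equal (PySem.Set.ofList s) g) then acc
        else acc ++ [PySem.Set.ofList s]) acc := by
  induction fam generalizing acc with
  | nil => rfl
  | cons s t ih =>
      simp only [List.foldl_cons]
      cases h : acc.any (fun g => PySem.Set.equal (PySem.Set.ofList s) g) with
      | true => simpa [h] using ih acc
      | false => simpa [h] using ih (acc ++ [PySem.Set.ofList s])

lemma norm_eq (family : List (List Int)) : pyNormalizeFamily family = pvNormB family :=
  norm_aux family []

lemma normB_nodup (fam : List (List Int)) :
    ∀ (acc : List (PySem.Set Int)), (∀ x ∈ acc, x.Nodup) →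
    ∀ x ∈ fam.foldl (fun (acc : List (PySem.Set Int)) s =>
        let fs : PySem.Set Int := PySem.Set.ofList s
        if acc.any (fun g => PySem.Set.equal fs g) then acc else acc ++ [fs]) acc, x.Nodup := by
  induction fam with
  | nil => intro acc h x hx; exact h x hx
  | cons s t ih =>
      intro acc h x hx
      simp only [List.foldl_cons] at hx
      refine ih _ ?_ x hx
      intro y hy
      cases hc : acc.any (fun g => PySem.Set.equal (PySem.Set.ofList s) g) with
      | false =>
          simp [hc] at hy
          rcases hy with h1 | h1
          · exact h y h1
          · subst h1; exact PySem.Set.nodup_ofList s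
      | true =>
          simp [hc] at hy
          exact h y hy

lemma nodes_nodup (family : List (List Int)) :
    ∀ s ∈ PySem.List.sorted2 (pvNormB family) PySem.Set.len pvKeyStrs, s.Nodup := by
  intro s hs
  have hmem : s ∈ pvNormB family :=
    (PySem.List.sorted2_perm (pvNormB family) PySem.Set.len pvKeyStrs false).mem_iff.1 hs
  exact normB_nodup family [] (by intro x hx; cases hx) s hmem

-- stable insertion with an arbitrary 'before' preserves a transitive pairwise relation
lemma insertBy_pairwise_R {α : Type} (R : α → α → Prop) (before : α → α → Bool)
    (htr : ∀ a b c, R a b → R b c → R a c) (x : α)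
    (h1 : ∀ b, before x b = true → R x b) (h2 : ∀ b, before x b = false → R b x)
    (ys : List α) (hys : ys.Pairwise R) :
    (PySem.List.insertBy before x ys).Pairwise R := by
  induction ys with
  | nil => simp [PySem.List.insertBy]
  | cons y ys ih =>
      rw [PySem.List.insertBy.eq_2]
      rcases List.pairwise_cons.1 hys with ⟨hy, hys'⟩
      cases hb : before x y with
      | true =>
          rw [if_pos rfl]
          refine List.pairwise_cons.2 ⟨?_, hys⟩
          intro z hz
          rcases List.mem_cons.1 hz with h | h
          · exact h ▸ h1 y hb
          · exact htr x y z (h1 y hb) (hy z h)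
      | false =>
          rw [if_neg (by simp)]
          refine List.pairwise_cons.2 ⟨?_, ih hys'⟩
          intro z hz
          rcases (PySem.List.insertBy_mem_iff before x z ys).1 hz with h | h
          · exact h ▸ h2 y hb
          · exact hy z h

lemma foldl_insertBy_pairwise {α : Type} (R : α → α → Prop) (before : α → α → Bool)
    (htr : ∀ a b c, R a b → R b c → R a c)
    (h1 : ∀ x b, before x b = true → R x b) (h2 : ∀ x b, before x b = false → R b x)
    (l : List α) : ∀ (acc : List α), acc.Pairwise R →
    (l.foldl (fun acc x => PySem.List.insertBy before x acc) acc).Pairwise R := by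
  induction l with
  | nil => intro acc h; exact h
  | cons x t ih =>
      intro acc h
      exact ih _ (insertBy_pairwise_R R before htr x (h1 x) (h2 x) acc h)

-- the sorted node list is ordered by size
lemma sorted2_pairwise_len (xs : List (PySem.Set Int)) :
    (PySem.List.sorted2 xs PySem.Set.len pvKeyStrs).Pairwise
      (fun a b => PySem.Set.len a ≤ PySem.Set.len b) := by
  show (xs.foldl (fun acc x => PySem.List.insertBy
      (fun a b => decide (PySem.Set.len a < PySem.Set.len b) ||
        (!decide (PySem.Set.len b < PySem.Set.len a) && decide (pvKeyStrs a < pvKeyStrs b)))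
      x acc) []).Pairwise (fun a b => PySem.Set.len a ≤ PySem.Set.len b)
  refine foldl_insertBy_pairwise _ _ ?_ ?_ ?_ xs [] List.Pairwise.nil
  · intro a b c hab hbc; exact le_trans hab hbc
  · intro x b h
    simp only [Bool.or_eq_true, Bool.and_eq_true, decide_eq_true_eq, Bool.not_eq_true',
      decide_eq_false_iff_not] at h
    rcases h with h | ⟨h, -⟩ <;> omega
  · intro x b h
    simp only [Bool.or_eq_false_iff, decide_eq_false_iff_not] at h
    have := h.1
    omega

-- proper inclusion, characterised through lengths on Nodup lists
lemma ltSet_iff {A B : PySem.Set Int} (hA : A.Nodup) (hB : B.Nodup) :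
    pyLtSet A B = true ↔ (A.length < B.length ∧ A ⊆ B) := by
  unfold pyLtSet PySem.Set.equal
  rw [Bool.and_eq_true, Bool.not_eq_true']
  constructor
  · rintro ⟨h1, h2⟩
    rw [h1, Bool.true_and] at h2
    have hsub : A ⊆ B := (PySem.Set.issubset_iff A B).1 h1
    have hnsub : ¬ (B ⊆ A) := by
      intro hba
      rw [(PySem.Set.issubset_iff B A).2 hba] at h2
      simp at h2
    refine ⟨?_, hsub⟩
    rcases Nat.lt_or_ge A.length B.length with hlt | hge
    · exact hlt
    · exact absurd ((hA.subperm hsub).perm_of_length_le hge).symm.subset hnsub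
  · rintro ⟨hlt, hsub⟩
    have h1 := (PySem.Set.issubset_iff A B).2 hsub
    refine ⟨h1, ?_⟩
    rw [h1, Bool.true_and]
    cases h : PySem.Set.issubset B A with
    | false => rfl
    | true =>
        have := (hB.subperm ((PySem.Set.issubset_iff B A).1 h)).length_le
        omega

lemma pvC1_iff {A B : PySem.Set Int} :
    pvC1 A B = true ↔ (A.length < B.length ∧ A ⊆ B) := by
  unfold pvC1
  rw [Bool.and_eq_true, decide_eq_true_eq, PySem.Set.issubset_iff]
  simp only [PySem.Set.len]
  constructor
  · rintro ⟨h1, h2⟩; exact ⟨by exact_mod_cast h1, fun x hx => h2 x hx⟩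
  · rintro ⟨h1, h2⟩; exact ⟨by exact_mod_cast h1, fun x hx => h2 hx⟩

lemma lt_eq_c1 {A B : PySem.Set Int} (hA : A.Nodup) (hB : B.Nodup) :
    pyLtSet A B = pvC1 A B := by
  rw [Bool.eq_iff_iff, ltSet_iff hA hB, pvC1_iff]

-- the by-size bucket dict is grouping by length
lemma bysize_getD (N : List (PySem.Set Int)) (k : Int) :
    (N.foldl (fun d s => d.modify (PySem.Set.len s) [] (fun l => l ++ [s]))
        (PySem.Dict.empty : PySem.Dict Int (List (PySem.Set Int)))).getD k []
    = N.filter (fun s => PySem.Set.len s == k) := by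
  have h : N.foldl (fun d s => d.modify (PySem.Set.len s) [] (fun l => l ++ [s]))
        (PySem.Dict.empty : PySem.Dict Int (List (PySem.Set Int)))
      = (N.map (fun s => (PySem.Set.len s, s))).foldl
          (fun d p => d.modify p.1 [] (fun l => l ++ [p.2])) PySem.Dict.empty := by
    rw [List.foldl_map]
  rw [h, PySem.Dict.getD_foldl_modify_append]
  simp [List.filter_map, List.map_map, Function.comp_def]

-- the level scan of A finds a strict middle iff a direct scan over all nodes does
lemma cover_exists_eq (N : List (PySem.Set Int)) (hN : ∀ s ∈ N, s.Nodup)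
    (A B : PySem.Set Int) (hA : A.Nodup) (hB : B.Nodup) :
    ((PySem.List.pyRange (PySem.Set.len A + 1) (PySem.Set.len B)).any (fun k =>
        (N.filter (fun s => PySem.Set.len s == k)).any (fun C =>
          PySem.Set.issubset A C && PySem.Set.issubset C B)))
    = N.any (fun C => pyLtSet A C && pyLtSet C B) := by
  rw [Bool.eq_iff_iff]
  simp only [List.any_eq_true, List.mem_filter, Bool.and_eq_true, PySem.List.mem_pyRange_one,
    PySem.Set.issubset_iff, beq_iff_eq, PySem.Set.len]
  constructor
  · rintro ⟨k, ⟨hk1, hk2⟩, C, ⟨hCN, hlen⟩, hAC, hCB⟩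
    have hC := hN C hCN
    refine ⟨C, hCN, (ltSet_iff hA hC).2 ⟨by omega, fun x hx => hAC x hx⟩,
      (ltSet_iff hC hB).2 ⟨by omega, fun x hx => hCB x hx⟩⟩
  · rintro ⟨C, hCN, h1, h2⟩
    have hC := hN C hCN
    rw [ltSet_iff hA hC] at h1
    rw [ltSet_iff hC hB] at h2
    exact ⟨(C.length : Int), ⟨by omega, by omega⟩, C, ⟨hCN, rfl⟩,
      fun x hx => h1.2 hx, fun x hx => h2.2 hx⟩

-- A's is_cover double loop computes the direct no-middle scan
lemma coverBool_eq (N : List (PySem.Set Int)) (hN : ∀ s ∈ N, s.Nodup)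
    (A B : PySem.Set Int) (hA : A.Nodup) (hB : B.Nodup) :
    pvP N (A, B) = !(N.any (fun C => pyLtSet A C && pyLtSet C B)) := by
  unfold pvP
  have h1 : ∀ (ok : Bool) (k : Int), k ∈ PySem.List.pyRange (PySem.Set.len A + 1) (PySem.Set.len B) →
      ((N.foldl (fun d s => d.modify (PySem.Set.len s) [] (fun l => l ++ [s]))
          (PySem.Dict.empty : PySem.Dict Int (List (PySem.Set Int)))).getD k []).foldl (fun ok C =>
        if PySem.Set.issubset A C && PySem.Set.issubset C B then false else ok) ok
      = (if ((N.filter (fun s => PySem.Set.len s == k)).any (fun C =>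
            PySem.Set.issubset A C && PySem.Set.issubset C B)) then false else ok) := by
    intro ok k _
    rw [PySem.List.foldl_if_false_eq, bysize_getD]
    cases h : (N.filter (fun s => PySem.Set.len s == k)).any (fun C =>
        PySem.Set.issubset A C && PySem.Set.issubset C B) <;> simp [h]
  rw [PySem.List.foldl_congr_mem _ _ _ _ h1, PySem.List.foldl_if_false_eq,
    cover_exists_eq N hN A B hA hB]
  simp

lemma mem_of_pyGetD (N : List (PySem.Set Int)) (i : Int) (h0 : 0 ≤ i)
    (hlt : i < PySem.List.len N) : PySem.List.pyGetD N i [] ∈ N := by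
  have hi : i.toNat < N.length := by simp [PySem.List.len] at hlt; omega
  rw [PySem.List.pyGetD_eq_getElem]
  · exact N.getElem_mem hi
  all_goals simp [PySem.List.len] at *; omega

-- pvS is a Nodup, strictly increasing index list
lemma pvS_nodup (N : List (PySem.Set Int)) (i : Int) : (pvS N i).Nodup :=
  (PySem.List.nodup_pyRange_one 0 (PySem.List.len N)).filter _

lemma pvS_pairwise (N : List (PySem.Set Int)) (i : Int) : (pvS N i).Pairwise (· < ·) :=
  (PySem.List.pairwise_lt_pyRange_one 0 (PySem.List.len N)).filter _

lemma mem_pvS (N : List (PySem.Set Int)) (i j : Int) :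
    j ∈ pvS N i ↔ (0 ≤ j ∧ j < PySem.List.len N ∧
      pyLtSet (PySem.List.pyGetD N i []) (PySem.List.pyGetD N j []) = true) := by
  unfold pvS
  rw [List.mem_filter, PySem.List.mem_pyRange_one]
  tauto

lemma succ_getD (N : List (PySem.Set Int)) (i : Int) (h0 : 0 ≤ i)
    (hlt : i < PySem.List.len N) :
    PySem.List.pyGetD (pvSucc N) i [] = pvS N i := by
  unfold pvSucc
  rw [PySem.List.pyGetD_map_pyRange_of_nonneg _ _ _ _ h0 hlt]
  exact PySem.Set.ofList_eq_self_of_nodup _ (pvS_nodup N i)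

-- B's middle-existence test over successor sets equals the direct scan over all nodes
lemma covB_eq (N : List (PySem.Set Int)) (i j : Int)
    (hj0 : 0 ≤ j) (hjlt : j < PySem.List.len N) :
    ((pvS N i).any (fun k =>
        PySem.Set.contains (PySem.List.pyGetD (pvSucc N) k []) j))
    = N.any (fun C => pyLtSet (PySem.List.pyGetD N i []) C &&
        pyLtSet C (PySem.List.pyGetD N j [])) := by
  rw [Bool.eq_iff_iff]
  simp only [List.any_eq_true, Bool.and_eq_true]
  constructor
  · rintro ⟨k, hk, hc⟩
    rw [mem_pvS] at hk
    rcases hk with ⟨hk0, hklt, hik⟩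
    rw [succ_getD N k hk0 hklt] at hc
    have hj : j ∈ pvS N k := (PySem.Set.contains_iff _ _).1 hc
    rw [mem_pvS] at hj
    exact ⟨PySem.List.pyGetD N k [], mem_of_pyGetD N k hk0 hklt, hik, hj.2.2⟩
  · rintro ⟨C, hCN, h1, h2⟩
    rcases List.mem_iff_getElem.1 hCN with ⟨k, hk, rfl⟩
    have hgd : PySem.List.pyGetD N (k : Int) [] = N[k] := by
      rw [PySem.List.pyGetD_eq_getElem N [] (by omega) (by simp [PySem.List.len]; omega)]
      simp
    refine ⟨(k : Int), ?_, ?_⟩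
    · rw [mem_pvS]
      refine ⟨by omega, by simp [PySem.List.len]; omega, by rw [hgd]; exact h1⟩
    · rw [succ_getD N (k : Int) (by omega) (by simp [PySem.List.len]; omega)]
      refine (PySem.Set.contains_iff _ _).2 ?_
      rw [mem_pvS]
      exact ⟨hj0, hjlt, by rw [hgd]; exact h2⟩

-- A's subset_edges in flatMap form over index ranges
lemma subA_eq (N : List (PySem.Set Int)) :
    ((PySem.List.pyRange 0 (PySem.List.len N)).foldl (fun acc i =>
      let A := PySem.List.pyGetD N i []
      (PySem.List.pyRange (i + 1) (PySem.List.len N)).foldl (fun acc j =>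
        let B := PySem.List.pyGetD N j []
        if PySem.Set.len A ≥ PySem.Set.len B then acc
        else if PySem.Set.issubset A B then acc ++ [(A, B)] else acc) acc) ([] : List (List Int × List Int)))
    = (PySem.List.pyRange 0 (PySem.List.len N)).flatMap (fun i =>
        ((PySem.List.pyRange (i + 1) (PySem.List.len N)).filter (fun j =>
            pvC1 (PySem.List.pyGetD N i []) (PySem.List.pyGetD N j []))).map
          (fun j => (PySem.List.pyGetD N i [], PySem.List.pyGetD N j []))) := by
  have h1 : ∀ (acc : List (List Int × List Int)), ∀ i ∈ PySem.List.pyRange 0 (PySem.List.len N),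
      (let A := PySem.List.pyGetD N i []
       (PySem.List.pyRange (i + 1) (PySem.List.len N)).foldl (fun acc j =>
        let B := PySem.List.pyGetD N j []
        if PySem.Set.len A ≥ PySem.Set.len B then acc
        else if PySem.Set.issubset A B then acc ++ [(A, B)] else acc) acc)
      = acc ++ ((PySem.List.pyRange (i + 1) (PySem.List.len N)).filter (fun j =>
            pvC1 (PySem.List.pyGetD N i []) (PySem.List.pyGetD N j []))).map
          (fun j => (PySem.List.pyGetD N i [], PySem.List.pyGetD N j [])) := by
    intro acc i _
    have h2 : ∀ (acc : List (List Int × List Int)), ∀ j ∈ PySem.List.pyRange (i + 1) (PySem.List.len N),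
        (if PySem.Set.len (PySem.List.pyGetD N i []) ≥ PySem.Set.len (PySem.List.pyGetD N j []) then acc
         else if PySem.Set.issubset (PySem.List.pyGetD N i []) (PySem.List.pyGetD N j []) then
           acc ++ [(PySem.List.pyGetD N i [], PySem.List.pyGetD N j [])] else acc)
        = (if pvC1 (PySem.List.pyGetD N i []) (PySem.List.pyGetD N j []) then
            acc ++ [(PySem.List.pyGetD N i [], PySem.List.pyGetD N j [])] else acc) := by
      intro acc j _
      unfold pvC1
      by_cases hge : PySem.Set.len (PySem.List.pyGetD N i []) ≥ PySem.Set.len (PySem.List.pyGetD N j [])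
      · rw [if_pos hge]
        have h3 : decide (PySem.Set.len (PySem.List.pyGetD N i []) < PySem.Set.len (PySem.List.pyGetD N j [])) = false := by
          simp only [decide_eq_false_iff_not]; omega
        rw [h3, Bool.false_and, if_neg (by simp)]
      · rw [if_neg hge]
        have h3 : decide (PySem.Set.len (PySem.List.pyGetD N i []) < PySem.Set.len (PySem.List.pyGetD N j [])) = true := by
          simp only [decide_eq_true_eq]; omega
        rw [h3, Bool.true_and]
    show (PySem.List.pyRange (i + 1) (PySem.List.len N)).foldl _ acc = _
    rw [PySem.List.foldl_congr_mem _ _ _ _ h2, PySem.List.foldl_append_if]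
  rw [PySem.List.foldl_congr_mem _ _ _ _ h1, PySem.List.foldl_append_eq_flatMap]
  simp

-- B's hasse loop in flatMap form
lemma subB_eq (N : List (PySem.Set Int)) :
    pvHasseB N
    = (PySem.List.pyRange 0 (PySem.List.len N)).flatMap (fun i =>
        ((pvS N i).filter (fun j =>
            !((pvS N i).any (fun k =>
              PySem.Set.contains (PySem.List.pyGetD (pvSucc N) k []) j)))).map
          (fun j => (PySem.List.pyGetD N i [], PySem.List.pyGetD N j []))) := by
  unfold pvHasseB
  have h1 : ∀ (acc : List (List Int × List Int)), ∀ i ∈ PySem.List.pyRange 0 (PySem.List.len N),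
      ((PySem.List.sorted (PySem.List.pyGetD (pvSucc N) i []) (fun x => x)).foldl (fun acc j =>
        if !((PySem.List.pyGetD (pvSucc N) i []).any (fun k =>
              PySem.Set.contains (PySem.List.pyGetD (pvSucc N) k []) j))
        then acc ++ [(PySem.List.pyGetD N i [], PySem.List.pyGetD N j [])] else acc) acc)
      = acc ++ ((pvS N i).filter (fun j =>
            !((pvS N i).any (fun k =>
              PySem.Set.contains (PySem.List.pyGetD (pvSucc N) k []) j)))).map
          (fun j => (PySem.List.pyGetD N i [], PySem.List.pyGetD N j [])) := by
    intro acc i hi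
    rcases PySem.List.mem_pyRange_one.1 hi with ⟨hi0, hilt⟩
    rw [succ_getD N i hi0 hilt]
    have hs : PySem.List.sorted (pvS N i) (fun x => x) false = pvS N i :=
      PySem.List.sorted_eq_of_perm_of_pairwise_lt _ _ _ (List.Perm.refl _)
        (by simpa using pvS_pairwise N i)
    rw [hs, PySem.List.foldl_append_if]
  rw [PySem.List.foldl_congr_mem _ _ _ _ h1, PySem.List.foldl_append_eq_flatMap]
  simp

lemma hasse_eq (N : List (PySem.Set Int)) (hN : ∀ s ∈ N, s.Nodup)
    (hP : N.Pairwise (fun a b => PySem.Set.len a ≤ PySem.Set.len b)) :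
    pvHasseA N = pvHasseB N := by
  unfold pvHasseA
  show ((PySem.List.pyRange 0 (PySem.List.len N)).foldl (fun acc i =>
      let A := PySem.List.pyGetD N i []
      (PySem.List.pyRange (i + 1) (PySem.List.len N)).foldl (fun acc j =>
        let B := PySem.List.pyGetD N j []
        if PySem.Set.len A ≥ PySem.Set.len B then acc
        else if PySem.Set.issubset A B then acc ++ [(A, B)] else acc) acc)
      ([] : List (List Int × List Int))).foldl
      (fun acc AB => if pvP N AB then acc ++ [AB] else acc) [] = pvHasseB N
  rw [subA_eq N, PySem.List.foldl_append_if_eq_filter (pvP N), List.nil_append,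
    List.filter_flatMap, subB_eq N]
  apply List.flatMap_congr
  intro i hi
  rcases PySem.List.mem_pyRange_one.1 hi with ⟨hi0, hilt⟩
  have hA : (PySem.List.pyGetD N i []).Nodup := hN _ (mem_of_pyGetD N i hi0 hilt)
  rw [List.filter_map, List.filter_filter]
  have hSplit : pvS N i
      = (PySem.List.pyRange (i + 1) (PySem.List.len N)).filter (fun j =>
          pyLtSet (PySem.List.pyGetD N i []) (PySem.List.pyGetD N j [])) := by
    unfold pvS
    rw [PySem.List.pyRange_one_append 0 (i + 1) (PySem.List.len N) (by omega) (by omega),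
      List.filter_append]
    have hnil : (PySem.List.pyRange 0 (i + 1)).filter (fun j =>
        pyLtSet (PySem.List.pyGetD N i []) (PySem.List.pyGetD N j [])) = [] := by
      rw [List.filter_eq_nil_iff]
      intro j hj
      rcases PySem.List.mem_pyRange_one.1 hj with ⟨hj0, hjle⟩
      intro hlt
      have hB : (PySem.List.pyGetD N j []).Nodup := hN _ (mem_of_pyGetD N j hj0 (by omega))
      have hlen := ((ltSet_iff hA hB).1 hlt).1
      rcases lt_or_eq_of_le (show j ≤ i by omega) with hji | hji
      · have hiN : i.toNat < N.length := by
          have h := hilt; simp [PySem.List.len] at h; omega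
        have hjN : j.toNat < N.length := by
          have h := hilt; simp [PySem.List.len] at h; omega
        have hgi : PySem.List.pyGetD N i [] = N[i.toNat] :=
          PySem.List.pyGetD_eq_getElem N [] hi0 hilt
        have hgj : PySem.List.pyGetD N j [] = N[j.toNat] :=
          PySem.List.pyGetD_eq_getElem N [] hj0 (by omega)
        have hle := (List.pairwise_iff_getElem.1 hP) j.toNat i.toNat hjN hiN (by omega)
        rw [hgi, hgj] at hlen
        simp only [PySem.Set.len_eq] at hle
        omega
      · subst hji
        omega
    rw [hnil, List.nil_append]
  have hBfilt : (pvS N i).filter (fun j =>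
        !((pvS N i).any (fun k => PySem.Set.contains (PySem.List.pyGetD (pvSucc N) k []) j)))
      = (pvS N i).filter (fun j =>
        !(N.any (fun C => pyLtSet (PySem.List.pyGetD N i []) C &&
            pyLtSet C (PySem.List.pyGetD N j [])))) := by
    apply List.filter_congr
    intro j hj
    rw [mem_pvS] at hj
    rw [covB_eq N i j hj.1 hj.2.1]
  rw [hBfilt, hSplit, List.filter_filter]
  apply congrArg (List.map _)
  apply List.filter_congr
  intro j hj
  rcases PySem.List.mem_pyRange_one.1 hj with ⟨hj1, hjlt⟩
  have hB : (PySem.List.pyGetD N j []).Nodup := hN _ (mem_of_pyGetD N j (by omega) hjlt)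
  show (pvP N (PySem.List.pyGetD N i [], PySem.List.pyGetD N j []) &&
      pvC1 (PySem.List.pyGetD N i []) (PySem.List.pyGetD N j [])) = _
  rw [coverBool_eq N hN (PySem.List.pyGetD N i []) (PySem.List.pyGetD N j []) hA hB,
    lt_eq_c1 hA hB]

-- ===== VERDICT (by name: the statement is the Claim_ definition above) =====
theorem build_hasse_and_edges_spec : Claim_equal_build_hasse_and_edges := by
  intro family _hdom
  show build_hasse_and_edges family = build_hasse_and_edges_alt family
  rw [A_unfold, B_unfold, norm_eq]
  exact congrArg (Prod.mk _) (hasse_eq _ (nodes_nodup family)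
    (sorted2_pairwise_len (pvNormB family)))
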